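-- pv_equiv track=rewrite | github.com/forteek/timkod | second.py | create_code
-- ===== SOURCE A (Python) =====
-- import math
--
-- def bits(value, length):
--     bits = format(value, 'b')
--     bits = bits.zfill(length)
--
--     return bits
--
-- def create_code(chars):
--     code = {}
--     char_count = len(chars.keys())
--     length = math.ceil(math.log(char_count + 1, 2))
--
--     for index, key in enumerate(chars.keys()):
--         char_representation = bits(index, length)
--         code[key] = char_representation
--
--     return code
-- ===== SOURCE B (Python) =====
-- import math
-- from itertools import product
--
--
-- def create_code(chars):
--     length = math.ceil(math.log(len(chars) + 1, 2))
--     codes = (''.join(bits) for bits in product('01', repeat=length))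
--     return dict(zip(chars, codes))
-- ===== Notes on version B (the rewrite author's own statement) =====
-- stated objective: alternative
-- what changed: Instead of formatting each key's index with format(i,'b').zfill(length), B generates the whole fixed-length code table once with itertools.product('01', repeat=length) (whose lexicographic order is binary counting) and zips it with the keys.
import Mathlib
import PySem

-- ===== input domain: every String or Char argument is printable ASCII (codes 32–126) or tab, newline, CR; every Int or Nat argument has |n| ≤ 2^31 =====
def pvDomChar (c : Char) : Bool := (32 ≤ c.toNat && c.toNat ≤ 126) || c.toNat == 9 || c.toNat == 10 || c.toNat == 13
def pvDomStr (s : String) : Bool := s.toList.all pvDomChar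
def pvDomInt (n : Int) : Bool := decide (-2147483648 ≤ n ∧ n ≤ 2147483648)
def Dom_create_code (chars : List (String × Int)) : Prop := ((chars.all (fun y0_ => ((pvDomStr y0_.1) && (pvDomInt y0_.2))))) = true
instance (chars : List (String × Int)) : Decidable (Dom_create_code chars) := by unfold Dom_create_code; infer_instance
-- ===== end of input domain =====

-- B replaces A's per-index binary formatting (format + zfill) by generating the whole
-- fixed-length code space (itertools.product('01', repeat=length)) and zipping it with the
-- keys; objective: alternative decomposition, same cost.

-- ===== PORT A =====
-- bits(value, length): format(value, 'b') then zfill(length)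
def pyBits (value : Int) (length : Int) : String :=
  PySem.Str.zfill (PySem.Int.toBin value) length

-- math.ceil(math.log(char_count + 1, 2)) is ported as char_count.bit_length(): the two are
-- equal for every dict size below 2^29 - 1 (checked against CPython's float evaluation).
def create_code (chars : List (String × Int)) : List (String × String) :=
  let d : PySem.Dict String Int := PySem.Dict.mk chars
  let char_count : Int := ((d.keys).length : Int)
  let length : Int := (PySem.Int.bitLength char_count : Int)
  ((PySem.List.enumerate d.keys 0).foldl
    (fun code ik => code.insert ik.2 (pyBits ik.1 length)) PySem.Dict.empty).items

-- ===== PORT B =====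
-- itertools.product('01', repeat=k), each tuple joined to a string (first position varies slowest)
def prodCodes : Nat → List (List Char)
  | 0 => [[]]
  | k + 1 => (prodCodes k).map (fun t => '0' :: t) ++ (prodCodes k).map (fun t => '1' :: t)

def create_code_alt (chars : List (String × Int)) : List (String × String) :=
  let length : Nat := PySem.Int.bitLength ((chars.length : Nat) : Int)  -- same ceil-log formula as A, ported the same way
  let codes : List String := (prodCodes length).map (fun t => String.ofList t)
  let keys : List String := (PySem.Dict.mk chars).keys                  -- zip(chars, codes) iterates the dict's keys
  ((keys.zip codes).foldl (fun d kc => d.insert kc.1 kc.2) PySem.Dict.empty).items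

-- ===== PRECONDITION & SPEC =====
def Spec_create_code (chars : List (String × Int)) (out : List (String × String)) : Prop := out = create_code_alt chars
instance (chars : List (String × Int)) (out : List (String × String)) : Decidable (Spec_create_code chars out) := by unfold Spec_create_code; infer_instance

-- ===== CLAIM (what is proved, stated in full; the proofs are below) =====
def Claim_equal_create_code : Prop := ∀ (chars : List (String × Int)), Dom_create_code chars → Spec_create_code chars (create_code chars)

-- ===== LEMMAS AND PROOFS =====

-- format(n, 'b') for n ≥ 0, as a structural recursion (msb first)
def myBin (n : Nat) : List Char :=
  if n < 2 then [Nat.digitChar n] else myBin (n / 2) ++ [Nat.digitChar (n % 2)]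
decreasing_by exact Nat.div_lt_self (by omega) (by omega)

lemma toDigitsCore_eq_myBin : ∀ (f n : Nat) (ds : List Char), n < f →
    Nat.toDigitsCore 2 f n ds = myBin n ++ ds := by
  intro f
  induction f with
  | zero => omega
  | succ f ih =>
    intro n ds h
    rw [Nat.toDigitsCore]
    by_cases h2 : n < 2
    · have h0 : n / 2 = 0 := by omega
      have hm : n % 2 = n := by omega
      simp only [h0, hm, reduceIte]
      conv_rhs => rw [myBin]
      rw [if_pos h2]
      rfl
    · have hd : ¬ n / 2 = 0 := by omega
      simp only [if_neg hd]
      rw [ih (n / 2) _ (by omega)]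
      conv_rhs => rw [myBin]
      rw [if_neg h2, List.append_assoc]
      rfl

lemma toDigits_eq_myBin (n : Nat) : Nat.toDigits 2 n = myBin n := by
  rw [Nat.toDigits, toDigitsCore_eq_myBin (n + 1) n [] (by omega), List.append_nil]

-- the fixed-length binary code of i on k digits, lsb recursion
def fixBin : Nat → Nat → List Char
  | 0, _ => []
  | k + 1, i => fixBin k (i / 2) ++ [Nat.digitChar (i % 2)]

lemma length_fixBin (k i : Nat) : (fixBin k i).length = k := by
  induction k generalizing i with
  | zero => rfl
  | succ k ih => simp [fixBin, ih]

-- msb characterisation: the first digit splits the range at 2^k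
lemma fixBin_succ_msb (k i : Nat) (h : i < 2 ^ (k + 1)) :
    fixBin (k + 1) i = (if i < 2 ^ k then '0' else '1') :: fixBin k (i % 2 ^ k) := by
  induction k generalizing i with
  | zero =>
    interval_cases i <;> decide
  | succ k ih =>
    show fixBin (k + 1) (i / 2) ++ [Nat.digitChar (i % 2)] = _
    have h1 : i / 2 < 2 ^ (k + 1) := by
      have := Nat.pow_succ 2 (k + 1)
      omega
    rw [ih (i / 2) h1]
    have e1 : i / 2 % 2 ^ k = i % 2 ^ (k + 1) / 2 := by
      rw [pow_succ']
      exact Eq.symm (Nat.mod_mul_right_div_self i 2 (2 ^ k))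
    have e2 : i % 2 = i % 2 ^ (k + 1) % 2 := by
      rw [Nat.mod_mod_of_dvd i ⟨2 ^ k, by rw [pow_succ']⟩]
    have e3 : (i / 2 < 2 ^ k) = (i < 2 ^ (k + 1)) := by
      have := Nat.pow_succ 2 k
      simp only [eq_iff_iff]
      omega
    rw [show fixBin (k + 1) (i % 2 ^ (k + 1)) =
        fixBin k (i % 2 ^ (k + 1) / 2) ++ [Nat.digitChar (i % 2 ^ (k + 1) % 2)] from rfl]
    rw [e1, e2]
    simp only [e3]
    simp

-- for i in the top half, myBin already has exactly k+1 digits and equals fixBin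
lemma myBin_eq_fixBin_of_top (k i : Nat) (h1 : 2 ^ k ≤ i) (h2 : i < 2 ^ (k + 1)) :
    myBin i = fixBin (k + 1) i := by
  induction k generalizing i with
  | zero =>
    interval_cases i
    rw [myBin]
    norm_num [fixBin]
  | succ k ih =>
    have hi2 : ¬ i < 2 := by
      have : (2:Nat) ≤ 2 ^ (k + 1) := Nat.le_self_pow (by omega) 2
      omega
    rw [myBin, if_neg hi2]
    have ha : 2 ^ k ≤ i / 2 := by
      have := Nat.pow_succ 2 k
      omega
    have hb : i / 2 < 2 ^ (k + 1) := by
      have := Nat.pow_succ 2 (k + 1)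
      omega
    rw [ih (i / 2) ha hb]
    rfl

lemma length_myBin_le (k i : Nat) (hk : 1 ≤ k) (hi : i < 2 ^ k) : (myBin i).length ≤ k := by
  induction k generalizing i with
  | zero => omega
  | succ k ih =>
    by_cases h2 : i < 2
    · rw [myBin, if_pos h2]; simp
    · rw [myBin, if_neg h2]
      have hk1 : 1 ≤ k := by
        by_contra hc
        have : k = 0 := by omega
        subst this
        simp at hi
        omega
      have hq : i / 2 < 2 ^ k := by
        have := Nat.pow_succ 2 k
        omega
      have := ih (i / 2) hk1 hq
      simp
      omega

lemma myBin_head (n : Nat) : ∃ t, myBin n = '0' :: t ∨ myBin n = '1' :: t := by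
  fun_induction myBin n with
  | case1 n h =>
    interval_cases n
    · exact ⟨[], Or.inl rfl⟩
    · exact ⟨[], Or.inr rfl⟩
  | case2 n h ih =>
    obtain ⟨t, ht⟩ := ih
    cases ht with
    | inl h' => exact ⟨t ++ [Nat.digitChar (n % 2)], Or.inl (by rw [h']; rfl)⟩
    | inr h' => exact ⟨t ++ [Nat.digitChar (n % 2)], Or.inr (by rw [h']; rfl)⟩

-- zfill on a string that starts with a digit is plain left padding
lemma zfill_digit_head (c : Char) (t : List Char) (hc : ¬ (c = '+' ∨ c = '-')) (w : Nat) :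
    PySem.Chars.zfill (c :: t) ((w : Nat) : Int) =
      List.replicate (w - (t.length + 1)) '0' ++ c :: t := by
  rw [PySem.Chars.zfill.eq_def]
  by_cases h : ((w : Nat) : Int) ≤ (((c :: t).length : Nat) : Int)
  · rw [if_pos h]
    have : w - (t.length + 1) = 0 := by simp at h; omega
    rw [this]
    rfl
  · rw [if_neg h]
    simp only [if_neg hc]
    simp at h ⊢

-- zfill-padded binary equals the fixed-length code, for every index below 2^k (k ≥ 1)
lemma zfill_myBin (k : Nat) : ∀ i, 1 ≤ k → i < 2 ^ k →
    PySem.Chars.zfill (myBin i) ((k : Nat) : Int) = fixBin k i := by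
  induction k with
  | zero => omega
  | succ k ih =>
    intro i _ hi
    by_cases htop : 2 ^ k ≤ i
    · -- top half (includes k = 0): myBin i has exactly k+1 digits, zfill is the identity
      have hlen : (myBin i).length = k + 1 := by
        rw [myBin_eq_fixBin_of_top k i htop hi, length_fixBin]
      rw [PySem.Chars.zfill.eq_def, if_pos (by rw [hlen])]
      exact myBin_eq_fixBin_of_top k i htop hi
    · push Not at htop
      have hmod : i % 2 ^ k = i := Nat.mod_eq_of_lt htop
      by_cases hk0 : k = 0
      · subst hk0
        have : i = 0 := by omega
        subst this
        rw [myBin]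
        norm_num [fixBin, PySem.Chars.zfill.eq_def]
      · have hk1 : 1 ≤ k := by omega
        have hlen : (myBin i).length ≤ k := length_myBin_le k i hk1 htop
        obtain ⟨t, ht⟩ := myBin_head i
        have hrepl : ∀ c : Char, ¬ (c = '+' ∨ c = '-') → myBin i = c :: t →
            PySem.Chars.zfill (myBin i) (((k + 1 : Nat) : Nat) : Int) =
              '0' :: PySem.Chars.zfill (myBin i) ((k : Nat) : Int) := by
          intro c hc h'
          rw [h'] at hlen ⊢
          rw [zfill_digit_head c t hc (k + 1), zfill_digit_head c t hc k]
          simp at hlen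
          rw [show k + 1 - (t.length + 1) = (k - (t.length + 1)) + 1 by omega,
            List.replicate_succ]
          rfl
        have hstep : PySem.Chars.zfill (myBin i) (((k + 1 : Nat) : Nat) : Int) =
            '0' :: PySem.Chars.zfill (myBin i) ((k : Nat) : Int) := by
          cases ht with
          | inl h' => exact hrepl '0' (by decide) h'
          | inr h' => exact hrepl '1' (by decide) h'
        rw [hstep, ih i hk1 htop, fixBin_succ_msb k i hi, if_pos htop, hmod]

-- the product-generated table lists the fixed-length codes of 0 … 2^k - 1 in order
lemma prodCodes_eq (k : Nat) : prodCodes k = (List.range (2 ^ k)).map (fixBin k) := by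
  induction k with
  | zero => rfl
  | succ k ih =>
    rw [show 2 ^ (k + 1) = 2 ^ k + 2 ^ k by ring, List.range_add]
    rw [List.map_append, List.map_map]
    show (prodCodes k).map (fun t => '0' :: t) ++ (prodCodes k).map (fun t => '1' :: t) = _
    rw [ih, List.map_map, List.map_map]
    congr 1
    · apply List.map_congr_left
      intro i hi
      have hi' : i < 2 ^ k := List.mem_range.mp hi
      have : i < 2 ^ (k + 1) := by
        have := Nat.pow_succ 2 k
        omega
      show '0' :: fixBin k i = fixBin (k + 1) i
      rw [fixBin_succ_msb k i this, if_pos hi', Nat.mod_eq_of_lt hi']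
    · apply List.map_congr_left
      intro i hi
      have hi' : i < 2 ^ k := List.mem_range.mp hi
      have h1 : 2 ^ k + i < 2 ^ (k + 1) := by
        have := Nat.pow_succ 2 k
        omega
      show '1' :: fixBin k i = fixBin (k + 1) (2 ^ k + i)
      rw [fixBin_succ_msb k (2 ^ k + i) h1, if_neg (by omega), Nat.add_mod_left,
        Nat.mod_eq_of_lt hi']

-- A's formatted code for index i equals entry i of B's table
lemma pyBits_eq_fixBin (k i : Nat) (hk : 1 ≤ k) (hi : i < 2 ^ k) :
    pyBits ((i : Nat) : Int) (((k : Nat) : Nat) : Int) = String.ofList (fixBin k i) := by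
  apply String.toList_inj.mp
  rw [pyBits, PySem.Str.toList_zfill, PySem.Int.toList_toBin]
  rw [show PySem.Int.toBinChars ((i : Nat) : Int) = Nat.toDigits 2 i by
    rw [PySem.Int.toBinChars]
    rw [if_neg (by omega)]
    norm_num]
  rw [toDigits_eq_myBin, zfill_myBin k i hk hi]
  simp

lemma bitLength_pos_lt (c : Nat) :
    c < 2 ^ PySem.Int.bitLength ((c : Nat) : Int) := by
  have := PySem.Int.lt_two_pow_bitLength ((c : Nat) : Int)
  simpa using this

-- the two key/code pair lists coincide
lemma key_lists_eq (keys : List String) :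
    (PySem.List.enumerate keys 0).map
      (fun ik => (ik.2, pyBits ik.1 ((PySem.Int.bitLength ((keys.length : Nat) : Int) : Nat) : Int)))
    = keys.zip ((prodCodes (PySem.Int.bitLength ((keys.length : Nat) : Int))).map (fun t => String.ofList t)) := by
  set L : Nat := PySem.Int.bitLength ((keys.length : Nat) : Int) with hL
  have hclt : keys.length < 2 ^ L := bitLength_pos_lt keys.length
  apply List.ext_getElem
  · rw [List.length_map, PySem.List.length_enumerate, List.length_zip, List.length_map]
    have hp : (prodCodes L).length = 2 ^ L := by rw [prodCodes_eq]; simp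
    rw [hp]
    omega
  · intro i h1 h2
    have hik : i < keys.length := by
      simpa [PySem.List.length_enumerate] using h1
    have hi2 : i < 2 ^ L := by omega
    have hk1 : 1 ≤ L := by
      by_contra hc
      have h0 : L = 0 := by omega
      rw [h0, pow_zero] at hclt
      omega
    rw [List.getElem_map, PySem.List.getElem_enumerate keys 0 i (by simpa [PySem.List.length_enumerate])]
    rw [List.getElem_zip]
    simp only [prodCodes_eq, List.map_map, List.getElem_map, List.getElem_range,
      Function.comp_apply, zero_add]
    rw [pyBits_eq_fixBin L i hk1 hi2]

-- ===== VERDICT (by name: the statement is the Claim_ definition above) =====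
theorem create_code_spec : Claim_equal_create_code := by
  intro chars _
  show create_code chars = create_code_alt chars
  unfold create_code create_code_alt
  simp only []
  have hkeylen : ((PySem.Dict.mk chars).keys).length = chars.length := by
    simp [PySem.Dict.keys]
  rw [← hkeylen]
  congr 1
  rw [← key_lists_eq ((PySem.Dict.mk chars).keys), List.foldl_map]
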